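-- pv_equiv track=rewrite | github.com/zimalabs/code-decisions | src/decision/utils/similarity.py | _affects_overlap
-- ===== SOURCE A (Python) =====
-- def _affects_overlap(a_paths: list[str], b_paths: list[str]) -> int:
--     """Count overlapping affects entries between two decisions.
--
--     Handles exact matches and directory containment (``src/auth/`` contains ``src/auth/handler.py``).
--     """
--     if not a_paths or not b_paths:
--         return 0
--
--     a_set = set(a_paths)
--     b_set = set(b_paths)
--     count = len(a_set & b_set)
--
--     # Directory containment: "src/auth/" contains "src/auth/handler.py"
--     a_dirs = [p for p in a_set if p.endswith("/")]
--     b_dirs = [p for p in b_set if p.endswith("/")]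
--     for a_dir in a_dirs:
--         for bp in b_set:
--             if bp != a_dir and bp.startswith(a_dir):
--                 count += 1
--     for b_dir in b_dirs:
--         for ap in a_set:
--             if ap != b_dir and ap.startswith(b_dir):
--                 count += 1
--
--     return count
-- ===== SOURCE B (Python) =====
-- def _dir_prefixes(path):
--     """All proper prefixes of *path* that end with '/'."""
--     res = []
--     cur = ""
--     for ch in path[:-1]:
--         cur += ch
--         if ch == "/":
--             res.append(cur)
--     return res
--
--
-- def _affects_overlap(a_paths: list[str], b_paths: list[str]) -> int:
--     a_set = set(a_paths)
--     b_set = set(b_paths)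
--     a_dirs = {p for p in a_set if p.endswith("/")}
--     b_dirs = {p for p in b_set if p.endswith("/")}
--     count = 0
--     for bp in b_set:
--         if bp in a_set:
--             count += 1
--         for d in _dir_prefixes(bp):
--             if d in a_dirs:
--                 count += 1
--     for ap in a_set:
--         for d in _dir_prefixes(ap):
--             if d in b_dirs:
--                 count += 1
--     return count
-- ===== Notes on version B (the rewrite author's own statement) =====
-- stated objective: alternative
-- what changed: Instead of scanning every (dir, path) pair in two nested loops, B enumerates each path's proper '/'-terminated prefixes in one left-to-right scan and looks each up in the opposite side's dir set, folding the exact-match count into the same pass; this trades the dirs-times-paths double loop for per-path prefix enumeration.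
import Mathlib
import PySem

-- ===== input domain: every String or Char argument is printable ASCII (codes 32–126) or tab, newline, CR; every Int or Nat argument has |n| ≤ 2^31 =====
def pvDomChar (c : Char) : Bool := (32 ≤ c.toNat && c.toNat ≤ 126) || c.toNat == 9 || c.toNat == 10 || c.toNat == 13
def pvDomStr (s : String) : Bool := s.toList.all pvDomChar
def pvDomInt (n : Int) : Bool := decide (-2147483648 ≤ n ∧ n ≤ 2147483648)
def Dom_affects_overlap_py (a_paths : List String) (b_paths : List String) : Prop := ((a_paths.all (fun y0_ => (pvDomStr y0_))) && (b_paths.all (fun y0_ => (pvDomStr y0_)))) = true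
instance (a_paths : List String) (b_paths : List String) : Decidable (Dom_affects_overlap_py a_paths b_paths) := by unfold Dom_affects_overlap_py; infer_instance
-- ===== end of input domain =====

-- B replaces A's (dirs × paths) double scans by enumerating each path's proper '/'-terminated
-- prefixes in one scan and looking them up in the opposite side's dir set (objective: alternative).

-- ===== PORT A =====
def affects_overlap_py (a_paths : List String) (b_paths : List String) : Int :=
  if a_paths = [] ∨ b_paths = [] then 0
  else
    let a_set := PySem.Set.ofList a_paths
    let b_set := PySem.Set.ofList b_paths
    let count : Int := PySem.Set.len (PySem.Set.inter a_set b_set)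
    let a_dirs := a_set.filter (fun p => PySem.Str.endswith p "/")
    let b_dirs := b_set.filter (fun p => PySem.Str.endswith p "/")
    let count := a_dirs.foldl (fun c a_dir =>
      b_set.foldl (fun c bp =>
        if bp ≠ a_dir ∧ PySem.Str.startswith bp a_dir then c + 1 else c) c) count
    let count := b_dirs.foldl (fun c b_dir =>
      a_set.foldl (fun c ap =>
        if ap ≠ b_dir ∧ PySem.Str.startswith ap b_dir then c + 1 else c) c) count
    count

-- ===== PORT B =====
-- _dir_prefixes: scan path[:-1], growing cur and collecting it after each '/'
def pvDirPrefixes (path : String) : List String :=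
  (path.toList.dropLast.foldl
    (fun (st : List Char × List String) ch =>
      let cur := st.1 ++ [ch]
      (cur, if ch = '/' then st.2 ++ [String.ofList cur] else st.2))
    (([] : List Char), ([] : List String))).2

def affects_overlap_py_alt (a_paths : List String) (b_paths : List String) : Int :=
  let a_set := PySem.Set.ofList a_paths
  let b_set := PySem.Set.ofList b_paths
  let a_dirs := PySem.Set.ofList (a_set.filter (fun p => PySem.Str.endswith p "/"))
  let b_dirs := PySem.Set.ofList (b_set.filter (fun p => PySem.Str.endswith p "/"))
  let count : Int := b_set.foldl (fun c bp =>
    (pvDirPrefixes bp).foldl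
      (fun c d => if PySem.Set.contains a_dirs d then c + 1 else c)
      (if PySem.Set.contains a_set bp then c + 1 else c)) 0
  let count := a_set.foldl (fun c ap =>
    (pvDirPrefixes ap).foldl
      (fun c d => if PySem.Set.contains b_dirs d then c + 1 else c) c) count
  count

-- ===== PRECONDITION & SPEC =====
def Spec_affects_overlap_py (a_paths : List String) (b_paths : List String) (out : Int) : Prop := out = affects_overlap_py_alt a_paths b_paths
instance (a_paths : List String) (b_paths : List String) (out : Int) : Decidable (Spec_affects_overlap_py a_paths b_paths out) := by unfold Spec_affects_overlap_py; infer_instance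

-- ===== CLAIM (what is proved, stated in full; the proofs are below) =====
def Claim_equal_affects_overlap_py : Prop := ∀ (a_paths : List String) (b_paths : List String), Dom_affects_overlap_py a_paths b_paths → Spec_affects_overlap_py a_paths b_paths (affects_overlap_py a_paths b_paths)


-- ===== LEMMAS AND PROOFS =====

-- specification of the _dir_prefixes scan
def pvSpecPref (cur : List Char) : List Char → List String
  | [] => []
  | ch :: t => (if ch = '/' then [String.ofList (cur ++ [ch])] else []) ++ pvSpecPref (cur ++ [ch]) t

theorem pvFold_spec (t : List Char) : ∀ (cur : List Char) (res : List String),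
    (t.foldl (fun (st : List Char × List String) ch =>
        let cur := st.1 ++ [ch]
        (cur, if ch = '/' then st.2 ++ [String.ofList cur] else st.2)) (cur, res))
    = (cur ++ t, res ++ pvSpecPref cur t) := by
  induction t with
  | nil => intro cur res; simp [pvSpecPref]
  | cons ch t ih =>
    intro cur res
    simp only [List.foldl_cons, pvSpecPref]
    rw [ih]
    split_ifs with h <;> simp [h]

theorem pvDirPrefixes_eq (p : String) :
    pvDirPrefixes p = pvSpecPref [] p.toList.dropLast := by
  unfold pvDirPrefixes
  rw [pvFold_spec]
  simp

theorem mem_pvSpecPref : ∀ (t cur : List Char) (d : String),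
    d ∈ pvSpecPref cur t ↔ ∃ q : List Char, (q ++ ['/']) <+: t ∧ d = String.ofList (cur ++ (q ++ ['/'])) := by
  intro t
  induction t with
  | nil =>
    intro cur d
    simp only [pvSpecPref, List.not_mem_nil, false_iff]
    rintro ⟨q, hq, -⟩
    have := hq.length_le
    simp at this
  | cons ch t ih =>
    intro cur d
    simp only [pvSpecPref, List.mem_append, ih]
    constructor
    · rintro (hd | ⟨q, hq, rfl⟩)
      · split_ifs at hd with h
        · simp at hd
          subst h
          exact ⟨[], ⟨t, by simp⟩, by simp [hd]⟩
        · simp at hd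
      · exact ⟨ch :: q, by simpa [List.cons_prefix_cons] using hq, by simp⟩
    · rintro ⟨q, hq, rfl⟩
      cases q with
      | nil =>
        rw [List.nil_append, List.cons_prefix_cons] at hq
        exact Or.inl (by simp [← hq.1])
      | cons c q =>
        rw [List.cons_append, List.cons_prefix_cons] at hq
        exact Or.inr ⟨q, hq.2, by simp [hq.1]⟩

theorem len_mem_pvSpecPref {t cur : List Char} {d : String}
    (h : d ∈ pvSpecPref cur t) : cur.length < d.toList.length := by
  rcases (mem_pvSpecPref t cur d).1 h with ⟨q, -, rfl⟩
  simp

theorem nodup_pvSpecPref : ∀ (t cur : List Char), (pvSpecPref cur t).Nodup := by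
  intro t
  induction t with
  | nil => intro cur; simp [pvSpecPref]
  | cons ch t ih =>
    intro cur
    simp only [pvSpecPref]
    rw [List.nodup_append]
    refine ⟨?_, ih _, ?_⟩
    · split_ifs <;> simp
    · intro a ha b hb
      split_ifs at ha with h
      · simp at ha
        subst ha
        have := len_mem_pvSpecPref hb
        intro hab
        rw [← hab] at this
        simp at this
      · simp at ha

theorem nodup_pvDirPrefixes (p : String) : (pvDirPrefixes p).Nodup := by
  rw [pvDirPrefixes_eq]; exact nodup_pvSpecPref _ _

theorem mem_pvDirPrefixes (p d : String) :
    d ∈ pvDirPrefixes p ↔ d ≠ p ∧ d.toList <+: p.toList ∧ ∃ q, d.toList = q ++ ['/'] := by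
  rw [pvDirPrefixes_eq, mem_pvSpecPref]
  constructor
  · rintro ⟨q, hq, rfl⟩
    have hpre : (q ++ ['/']) <+: p.toList := hq.trans (List.dropLast_prefix _)
    have hlen : (q ++ ['/']).length ≤ p.toList.dropLast.length := hq.length_le
    have hlt : (q ++ ['/']).length < p.toList.length := by
      simp at hlen ⊢
      omega
    refine ⟨?_, by simpa using hpre, q, by simp⟩
    intro hdp
    have hp : p.toList = q ++ ['/'] := by rw [← hdp]; simp
    simp [hp] at hlt
  · rintro ⟨hne, hpre, q, hq⟩
    refine ⟨q, ?_, by rw [← hq]; simp [String.ofList_toList]⟩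
    have hlt : d.toList.length < p.toList.length := by
      rcases Nat.lt_or_ge d.toList.length p.toList.length with h | h
      · exact h
      · exact absurd (String.toList_inj.mp (List.IsPrefix.eq_of_length_le hpre h)) hne
    rw [List.dropLast_eq_take, ← hq, List.prefix_take_iff]
    exact ⟨hpre, by omega⟩

-- generic counting folds and sum swap
theorem pvFoldl_count_ite {α : Type} (P : α → Prop) [DecidablePred P] :
    ∀ (l : List α) (a : Int),
    l.foldl (fun c x => if P x then c + 1 else c) a
      = a + (l.countP (fun x => decide (P x)) : Int) := by
  intro l
  induction l with
  | nil => intro a; simp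
  | cons x l ih =>
    intro a
    simp only [List.foldl_cons, List.countP_cons, ih]
    by_cases h : P x
    · simp [h]; omega
    · simp [h]

theorem pvSum_ite_count {α : Type} (P : α → Prop) [DecidablePred P] (l : List α) :
    (l.map (fun x => if P x then (1 : Int) else 0)).sum
      = (l.countP (fun x => decide (P x)) : Int) := by
  induction l with
  | nil => simp
  | cons x l ih =>
    simp only [List.map_cons, List.sum_cons, List.countP_cons, ih]
    by_cases h : P x
    · simp [h]; omega
    · simp [h]

theorem pvSum_swap {α β : Type} (l1 : List α) (l2 : List β) (f : α → β → Int) :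
    (l1.map (fun x => (l2.map (f x)).sum)).sum
      = (l2.map (fun y => (l1.map (fun x => f x y)).sum)).sum := by
  induction l1 with
  | nil => simp
  | cons x l1 ih => simp [ih, List.sum_map_add]

-- countP with contains swaps over two nodup lists
theorem pvCount_contains_comm (S T : List String) (hS : S.Nodup) (hT : T.Nodup) :
    S.countP (fun x => PySem.Set.contains T x) = T.countP (fun x => PySem.Set.contains S x) := by
  rw [List.countP_eq_length_filter, List.countP_eq_length_filter]
  apply List.Perm.length_eq
  rw [List.perm_ext_iff_of_nodup (hS.filter _) (hT.filter _)]
  intro d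
  simp only [List.mem_filter, PySem.Set.contains_iff]
  tauto

-- the core correspondence: dirs matching a path = the path's dir prefixes in dirs
theorem pvCount_core (dirs : List String) (hnd : dirs.Nodup)
    (hsl : ∀ d ∈ dirs, PySem.Str.endswith d "/" = true) (p : String) :
    dirs.countP (fun d => decide (p ≠ d ∧ PySem.Str.startswith p d = true))
      = (pvDirPrefixes p).countP (fun d => PySem.Set.contains dirs d) := by
  rw [List.countP_eq_length_filter, List.countP_eq_length_filter]
  apply List.Perm.length_eq
  rw [List.perm_ext_iff_of_nodup (hnd.filter _) ((nodup_pvDirPrefixes p).filter _)]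
  intro d
  simp only [List.mem_filter, decide_eq_true_eq, PySem.Set.contains_iff,
    mem_pvDirPrefixes, PySem.Str.startswith_eq, PySem.Chars.startswith_iff]
  constructor
  · rintro ⟨hd, hne, hpre⟩
    have := hsl d hd
    rw [PySem.Str.endswith_eq, PySem.Chars.endswith_iff] at this
    rcases this with ⟨q, hq⟩
    exact ⟨⟨fun h => hne h.symm, hpre, q, by simp [← hq]⟩, hd⟩
  · rintro ⟨⟨hne, hpre, -⟩, hd⟩
    exact ⟨hd, fun h => hne h.symm, hpre⟩



theorem pvAlt_norm (a b : List String) :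
    affects_overlap_py_alt a b
      = ((PySem.Set.ofList b).countP (fun x => PySem.Set.contains (PySem.Set.ofList a) x) : Int)
        + ((PySem.Set.ofList b).map (fun bp =>
            ((pvDirPrefixes bp).countP (fun d =>
              PySem.Set.contains ((PySem.Set.ofList a).filter (fun p => PySem.Str.endswith p "/")) d) : Int))).sum
        + ((PySem.Set.ofList a).map (fun ap =>
            ((pvDirPrefixes ap).countP (fun d =>
              PySem.Set.contains ((PySem.Set.ofList b).filter (fun p => PySem.Str.endswith p "/")) d) : Int))).sum := by
  unfold affects_overlap_py_alt
  simp only []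
  rw [PySem.Set.ofList_eq_self_of_nodup _ ((PySem.Set.nodup_ofList a).filter _),
      PySem.Set.ofList_eq_self_of_nodup _ ((PySem.Set.nodup_ofList b).filter _)]
  rw [PySem.List.foldl_congr_mem _ _
      (fun c ap => c + ((pvDirPrefixes ap).countP (fun d =>
            PySem.Set.contains ((PySem.Set.ofList b).filter (fun p => PySem.Str.endswith p "/")) d) : Int)) _
      (by
        intro c ap _
        dsimp only
        rw [PySem.List.foldl_count_if])]
  rw [PySem.List.foldl_add]
  rw [PySem.List.foldl_congr_mem _ _
      (fun c bp => c + ((if PySem.Set.contains (PySem.Set.ofList a) bp then (1:Int) else 0)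
        + ((pvDirPrefixes bp).countP (fun d =>
            PySem.Set.contains ((PySem.Set.ofList a).filter (fun p => PySem.Str.endswith p "/")) d) : Int))) _
      (by
        intro c bp _
        dsimp only
        rw [PySem.List.foldl_count_if]
        split_ifs with h <;> ring)]
  rw [PySem.List.foldl_add]
  rw [List.sum_map_add]
  have : ((PySem.Set.ofList b).map (fun bp =>
      if PySem.Set.contains (PySem.Set.ofList a) bp then (1:Int) else 0)).sum
      = ((PySem.Set.ofList b).countP (fun x => PySem.Set.contains (PySem.Set.ofList a) x) : Int) := by
    induction (PySem.Set.ofList b) with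
    | nil => simp
    | cons x l ih =>
      simp only [List.map_cons, List.sum_cons, List.countP_cons, ih]
      by_cases h : PySem.Set.contains (PySem.Set.ofList a) x
      · rw [if_pos h, if_pos h]; push_cast; ring
      · rw [if_neg h, if_neg h]; push_cast; ring
  rw [this]
  ring

theorem pvA_norm (a b : List String) (h : ¬(a = [] ∨ b = [])) :
    affects_overlap_py a b
      = ((PySem.Set.ofList a).countP (fun x => PySem.Set.contains (PySem.Set.ofList b) x) : Int)
        + (((PySem.Set.ofList a).filter (fun p => PySem.Str.endswith p "/")).map (fun d =>
            ((PySem.Set.ofList b).countP (fun bp =>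
              decide (bp ≠ d ∧ PySem.Str.startswith bp d = true)) : Int))).sum
        + (((PySem.Set.ofList b).filter (fun p => PySem.Str.endswith p "/")).map (fun d =>
            ((PySem.Set.ofList a).countP (fun ap =>
              decide (ap ≠ d ∧ PySem.Str.startswith ap d = true)) : Int))).sum := by
  unfold affects_overlap_py
  rw [if_neg h]
  simp only []
  rw [PySem.List.foldl_congr_mem _ _
      (fun c d => c + ((PySem.Set.ofList a).countP (fun ap =>
          decide (ap ≠ d ∧ PySem.Str.startswith ap d = true)) : Int)) _
      (by
        intro c d _
        dsimp only
        rw [pvFoldl_count_ite (fun ap => ap ≠ d ∧ PySem.Str.startswith ap d = true)])]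
  rw [PySem.List.foldl_add]
  rw [PySem.List.foldl_congr_mem _ _
      (fun c d => c + ((PySem.Set.ofList b).countP (fun bp =>
          decide (bp ≠ d ∧ PySem.Str.startswith bp d = true)) : Int)) _
      (by
        intro c d _
        dsimp only
        rw [pvFoldl_count_ite (fun bp => bp ≠ d ∧ PySem.Str.startswith bp d = true)])]
  rw [PySem.List.foldl_add]
  have hinter : PySem.Set.len (PySem.Set.inter (PySem.Set.ofList a) (PySem.Set.ofList b))
      = ((PySem.Set.ofList a).countP (fun x => PySem.Set.contains (PySem.Set.ofList b) x) : Int) := by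
    simp [PySem.Set.len, PySem.Set.inter, List.countP_eq_length_filter]
  rw [hinter]


theorem affects_overlap_py_main : ∀ (a b : List String),
    affects_overlap_py a b = affects_overlap_py_alt a b := by
  intro a b
  by_cases h : a = [] ∨ b = []
  · rw [pvAlt_norm]
    unfold affects_overlap_py
    rw [if_pos h]
    have hnil : PySem.Set.ofList ([] : List String) = [] := rfl
    rcases h with h | h <;> subst h <;>
      simp [hnil]
  · rw [pvA_norm a b h, pvAlt_norm]
    have hS := PySem.Set.nodup_ofList a
    have hT := PySem.Set.nodup_ofList b
    have hAD := hS.filter (fun p => PySem.Str.endswith p "/")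
    have hBD := hT.filter (fun p => PySem.Str.endswith p "/")
    have hslA : ∀ d ∈ (PySem.Set.ofList a).filter (fun p => PySem.Str.endswith p "/"),
        PySem.Str.endswith d "/" = true := fun d hd => (List.mem_filter.1 hd).2
    have hslB : ∀ d ∈ (PySem.Set.ofList b).filter (fun p => PySem.Str.endswith p "/"),
        PySem.Str.endswith d "/" = true := fun d hd => (List.mem_filter.1 hd).2
    have e1 : ((PySem.Set.ofList a).countP (fun x => PySem.Set.contains (PySem.Set.ofList b) x) : Int)
        = ((PySem.Set.ofList b).countP (fun x => PySem.Set.contains (PySem.Set.ofList a) x) : Int) := by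
      exact_mod_cast congrArg Nat.cast (pvCount_contains_comm _ _ hS hT)
    have e2 : ∀ (S T : List String), S.Nodup → T.Nodup →
        ((S.filter (fun p => PySem.Str.endswith p "/")).map (fun d =>
          (T.countP (fun bp => decide (bp ≠ d ∧ PySem.Str.startswith bp d = true)) : Int))).sum
        = (T.map (fun bp => ((pvDirPrefixes bp).countP (fun d =>
            PySem.Set.contains (S.filter (fun p => PySem.Str.endswith p "/")) d) : Int))).sum := by
      intro S T hSn hTn
      calc ((S.filter (fun p => PySem.Str.endswith p "/")).map (fun d =>
          (T.countP (fun bp => decide (bp ≠ d ∧ PySem.Str.startswith bp d = true)) : Int))).sum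
          = ((S.filter (fun p => PySem.Str.endswith p "/")).map (fun d =>
              (T.map (fun bp =>
                if bp ≠ d ∧ PySem.Str.startswith bp d = true then (1 : Int) else 0)).sum)).sum := by
            refine congrArg List.sum (List.map_congr_left ?_)
            intro d _
            rw [pvSum_ite_count (fun bp => bp ≠ d ∧ PySem.Str.startswith bp d = true)]
        _ = (T.map (fun bp =>
              ((S.filter (fun p => PySem.Str.endswith p "/")).map (fun d =>
                if bp ≠ d ∧ PySem.Str.startswith bp d = true then (1 : Int) else 0)).sum)).sum :=
            pvSum_swap _ _ _
        _ = (T.map (fun bp => ((pvDirPrefixes bp).countP (fun d =>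
              PySem.Set.contains (S.filter (fun p => PySem.Str.endswith p "/")) d) : Int))).sum := by
            refine congrArg List.sum (List.map_congr_left ?_)
            intro bp _
            rw [pvSum_ite_count (fun d => bp ≠ d ∧ PySem.Str.startswith bp d = true)]
            exact_mod_cast congrArg Nat.cast
              (pvCount_core _ (hSn.filter _) (fun d hd => (List.mem_filter.1 hd).2) bp)
    rw [e1, e2 (PySem.Set.ofList a) (PySem.Set.ofList b) hS hT,
      e2 (PySem.Set.ofList b) (PySem.Set.ofList a) hT hS]

-- ===== VERDICT (by name: the statement is the Claim_ definition above) =====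
theorem affects_overlap_py_spec : Claim_equal_affects_overlap_py := by
  intro a b _
  unfold Spec_affects_overlap_py
  exact affects_overlap_py_main a b
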